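-- pv_equiv track=rewrite | github.com/yh392261226/my_customs | others/new_preader_python/src/core/pagination/robust_paginator.py | _robust_paragraph_split
-- ===== SOURCE A (Python) =====
-- from typing import List, Tuple, Dict, Any, Optional
--
-- def _robust_paragraph_split(content: str) -> List[str]:
--     """健壮的段落分割算法"""
--     paragraphs = []
--     current_paragraph = []
--
--     # 使用多种分割符
--     lines = content.split('\n')
--
--     for line in lines:
--         line = line.strip()
--         if not line:
--             # 空行表示段落分隔
--             if current_paragraph:
--                 paragraphs.append(' '.join(current_paragraph))
--                 current_paragraph = []
--         else:
--             current_paragraph.append(line)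
--
--     # 添加最后一个段落
--     if current_paragraph:
--         paragraphs.append(' '.join(current_paragraph))
--
--     # 如果没有找到段落分隔，将整个内容作为一个段落
--     if not paragraphs:
--         paragraphs = [content.strip()] if content.strip() else [""]
--
--     # 合并过短的段落
--     merged_paragraphs = []
--     for paragraph in paragraphs:
--         if not merged_paragraphs or len(paragraph) < 20:
--             # 如果段落很短，尝试合并到前一个段落
--             if merged_paragraphs:
--                 merged_paragraphs[-1] += " " + paragraph
--             else:
--                 merged_paragraphs.append(paragraph)
--         else:
--             merged_paragraphs.append(paragraph)
--
--     return merged_paragraphs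
-- ===== SOURCE B (Python) =====
-- from typing import List
--
-- def _robust_paragraph_split(content: str) -> List[str]:
--     """Run-scanning re-implementation: group consecutive non-blank stripped lines."""
--     lines = [line.strip() for line in content.split('\n')]
--     n = len(lines)
--     paragraphs = []
--     i = 0
--     while i < n:
--         if lines[i]:
--             j = i
--             while j < n and lines[j]:
--                 j += 1
--             paragraphs.append(' '.join(lines[i:j]))
--             i = j
--         else:
--             i += 1
--     if not paragraphs:
--         paragraphs = [content.strip()] if content.strip() else ['']
--     merged = paragraphs[:1]
--     for paragraph in paragraphs[1:]:
--         if len(paragraph) < 20: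
--             merged[-1] += ' ' + paragraph
--         else:
--             merged.append(paragraph)
--     return merged
-- ===== Notes on version B (the rewrite author's own statement) =====
-- stated objective: alternative
-- what changed: Replaces A's open/flush accumulator state machine over lines with a two-pointer run scan that slices each maximal block of non-blank stripped lines and joins it directly, and starts the merge loop from the first paragraph instead of re-testing emptiness each iteration.
import Mathlib
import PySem

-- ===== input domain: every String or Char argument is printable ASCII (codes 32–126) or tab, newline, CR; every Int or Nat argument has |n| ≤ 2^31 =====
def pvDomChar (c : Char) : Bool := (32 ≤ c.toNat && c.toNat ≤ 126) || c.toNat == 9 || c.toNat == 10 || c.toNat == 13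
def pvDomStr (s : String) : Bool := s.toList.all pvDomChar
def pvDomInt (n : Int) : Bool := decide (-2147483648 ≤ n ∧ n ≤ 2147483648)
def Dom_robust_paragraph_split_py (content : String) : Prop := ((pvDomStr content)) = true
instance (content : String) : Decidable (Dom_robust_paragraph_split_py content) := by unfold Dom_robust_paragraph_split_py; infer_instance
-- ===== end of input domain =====

-- B replaces A's open/flush paragraph accumulator with a run scan over the stripped lines
-- (two-pointer grouping of consecutive non-blank lines); same return value, alternative structure.


-- ===== PORT A =====
-- loop body of A: strip the line; blank line flushes current_paragraph, otherwise append the line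
def pvStepA (st : List String × List String) (line : String) : List String × List String :=
  let line := PySem.Str.strip line
  if line = "" then
    (if st.2 ≠ [] then (st.1 ++ [PySem.Str.join " " st.2], []) else st)
  else (st.1, st.2 ++ [line])

-- merged_paragraphs[-1] += " " + paragraph  (replace the last element)
def pvAddLastA : List String → String → List String
  | [], p => [p]
  | [x], p => [x ++ " " ++ p]
  | x :: xs, p => x :: pvAddLastA xs p

-- merge-loop body of A
def pvMergeA (acc : List String) (p : String) : List String :=
  if acc = [] ∨ PySem.Str.len p < 20 then
    (if acc ≠ [] then pvAddLastA acc p else acc ++ [p])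
  else acc ++ [p]

def robust_paragraph_split_py (content : String) : List String :=
  let lines := (PySem.Str.split? content "\n").getD []   -- sep "\n" ≠ "", so split? is `some`
  let st := lines.foldl pvStepA ([], [])
  let paragraphs := if st.2 ≠ [] then st.1 ++ [PySem.Str.join " " st.2] else st.1
  let paragraphs := if paragraphs = [] then
      (if PySem.Str.strip content ≠ "" then [PySem.Str.strip content] else [""])
    else paragraphs
  paragraphs.foldl pvMergeA []

-- ===== PORT B =====
-- Source B's run scan: skip blank lines; a non-blank line opens a run `lines[i:j]` of
-- consecutive non-blank lines (the inner `while j < n and lines[j]` = takeWhile/dropWhile)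
def pvGroupsB : List String → List (List String)
  | [] => []
  | l :: ls =>
    if l = "" then pvGroupsB ls
    else (l :: ls.takeWhile (· ≠ "")) :: pvGroupsB (ls.dropWhile (· ≠ ""))
termination_by ls => ls.length
decreasing_by
  · simp
  · have := List.length_dropWhile_le (p := fun s : String => decide (s ≠ "")) (l := ls)
    simp at this ⊢; omega

-- merged[-1] += ' ' + paragraph
def pvAddLastB : List String → String → List String
  | [], p => [p]
  | [x], p => [x ++ " " ++ p]
  | x :: xs, p => x :: pvAddLastB xs p

-- merge-loop body of B (runs on an always-nonempty accumulator)
def pvMergeB (acc : List String) (p : String) : List String :=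
  if PySem.Str.len p < 20 then pvAddLastB acc p else acc ++ [p]

def robust_paragraph_split_py_alt (content : String) : List String :=
  let lines := ((PySem.Str.split? content "\n").getD []).map PySem.Str.strip
  let paragraphs := (pvGroupsB lines).map (PySem.Str.join " ")
  let paragraphs := if paragraphs = [] then
      (if PySem.Str.strip content ≠ "" then [PySem.Str.strip content] else [""])
    else paragraphs
  (paragraphs.drop 1).foldl pvMergeB (paragraphs.take 1)   -- paragraphs[:1] / paragraphs[1:]

-- ===== PRECONDITION & SPEC =====
def Spec_robust_paragraph_split_py (content : String) (out : List String) : Prop := out = robust_paragraph_split_py_alt content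
instance (content : String) (out : List String) : Decidable (Spec_robust_paragraph_split_py content out) := by unfold Spec_robust_paragraph_split_py; infer_instance

-- ===== CLAIM (what is proved, stated in full; the proofs are below) =====
def Claim_equal_robust_paragraph_split_py : Prop := ∀ (content : String), Dom_robust_paragraph_split_py content → Spec_robust_paragraph_split_py content (robust_paragraph_split_py content)

-- ===== LEMMAS AND PROOFS =====

theorem pvGroupsB_nil : pvGroupsB [] = [] := by simp [pvGroupsB]

theorem pvGroupsB_cons (l : String) (ls : List String) :
    pvGroupsB (l :: ls) = if l = "" then pvGroupsB ls
      else (l :: ls.takeWhile (· ≠ "")) :: pvGroupsB (ls.dropWhile (· ≠ "")) := by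
  rw [pvGroupsB]

-- A's loop state (paras, cur) summarised: the groups still to be produced, with `cur` pending
def pvG (cur : List String) (ms : List String) : List (List String) :=
  if cur = [] then pvGroupsB ms
  else (cur ++ ms.takeWhile (· ≠ "")) :: pvGroupsB (ms.dropWhile (· ≠ ""))

theorem pvPhase1 (lines : List String) : ∀ (paras cur : List String),
    (let st := lines.foldl pvStepA (paras, cur);
     if st.2 ≠ [] then st.1 ++ [PySem.Str.join " " st.2] else st.1)
    = paras ++ (pvG cur (lines.map PySem.Str.strip)).map (PySem.Str.join " ") := by
  induction lines with
  | nil =>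
    intro paras cur
    by_cases h : cur = [] <;> simp [pvG, h, pvGroupsB_nil]
  | cons l ls ih =>
    intro paras cur
    simp only [List.foldl_cons, List.map_cons]
    by_cases hm : PySem.Str.strip l = ""
    · by_cases hc : cur = []
      · subst hc
        simp only [pvStepA, hm]
        simpa [pvG, pvGroupsB_cons] using ih paras []
      · simp only [pvStepA, hm, if_pos hc]
        have := ih (paras ++ [PySem.Str.join " " cur]) []
        simp [pvG, hc, pvGroupsB_cons] at this ⊢
        simp [this]
    · simp only [pvStepA, hm]
      have := ih paras (cur ++ [PySem.Str.strip l])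
      by_cases hc : cur = []
      · subst hc
        simp [pvG, pvGroupsB_cons, hm] at this ⊢
        simp [this]
      · simp [pvG, hm, hc] at this ⊢
        simp [this]

theorem pvAddLast_eq (acc : List String) (p : String) : pvAddLastA acc p = pvAddLastB acc p := by
  induction acc with
  | nil => rfl
  | cons x xs ih =>
    cases xs with
    | nil => rfl
    | cons y ys => simp [pvAddLastA, pvAddLastB] at ih ⊢; exact ih

theorem pvAddLastB_ne_nil (acc : List String) (p : String) : pvAddLastB acc p ≠ [] := by
  cases acc with
  | nil => simp [pvAddLastB]
  | cons x xs => cases xs <;> simp [pvAddLastB]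

theorem pvMergeTail (qs : List String) : ∀ (acc : List String), acc ≠ [] →
    qs.foldl pvMergeA acc = qs.foldl pvMergeB acc := by
  induction qs with
  | nil => intro acc _; rfl
  | cons p ps ih =>
    intro acc hacc
    simp only [List.foldl_cons]
    have hstep : pvMergeA acc p = pvMergeB acc p := by
      by_cases hl : PySem.Str.len p < 20 <;>
        simp [pvMergeA, pvMergeB, hacc, pvAddLast_eq]

    rw [hstep]
    apply ih
    unfold pvMergeB
    split
    · exact pvAddLastB_ne_nil acc p
    · simp

theorem pvMerge_eq (q : String) (qs : List String) :
    (q :: qs).foldl pvMergeA [] = qs.foldl pvMergeB [q] := by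
  have h0 : pvMergeA [] q = [q] := by simp [pvMergeA]
  simp only [List.foldl_cons, h0]
  exact pvMergeTail qs [q] (by simp)

-- ===== VERDICT (by name: the statement is the Claim_ definition above) =====
theorem robust_paragraph_split_py_spec : Claim_equal_robust_paragraph_split_py := by
  intro content _
  unfold Spec_robust_paragraph_split_py robust_paragraph_split_py robust_paragraph_split_py_alt
  simp only
  rw [pvPhase1]
  simp only [List.nil_append]
  have hG : pvG [] (((PySem.Str.split? content "\n").getD []).map PySem.Str.strip)
      = pvGroupsB (((PySem.Str.split? content "\n").getD []).map PySem.Str.strip) := by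
    simp [pvG]
  rw [hG]
  set ps := (pvGroupsB (((PySem.Str.split? content "\n").getD []).map PySem.Str.strip)).map (PySem.Str.join " ") with hps
  by_cases hnil : ps = []
  · simp only [hnil]
    by_cases hs : PySem.Str.strip content = "" <;>
      simp [hs, pvMergeA]
  · simp only [if_neg hnil]
    obtain ⟨q, qs, hqq⟩ := List.exists_cons_of_ne_nil hnil
    rw [hqq]
    simp only [List.drop_succ_cons, List.drop_zero, List.take_succ_cons, List.take_zero]
    exact pvMerge_eq q qs
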